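-- pv_equiv track=rewrite | github.com/mohammadfaiizan/ProjectI | DSA/Problem/Graph/01_Graph_Fundamentals_Representations/Graph_Representation_Converter.py | to_compressed_sparse_row
-- ===== SOURCE A (Python) =====
-- from typing import List, Dict, Set, Tuple, Optional
--
-- def to_compressed_sparse_row(matrix: List[List[int]]) -> Tuple[List[int], List[int], List[int]]:
--     """
--     Convert adjacency matrix to Compressed Sparse Row (CSR) format
--
--     CSR consists of three arrays:
--     - values: non-zero values
--     - col_indices: column indices of non-zero values
--     - row_pointers: pointers to start of each row in values array
--
--     Time: O(V²)
--     Space: O(E + V)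
--     """
--     values = []
--     col_indices = []
--     row_pointers = [0]
--
--     for i, row in enumerate(matrix):
--         for j, val in enumerate(row):
--             if val != 0:
--                 values.append(val)
--                 col_indices.append(j)
--         row_pointers.append(len(values))
--
--     return values, col_indices, row_pointers
-- ===== SOURCE B (Python) =====
-- def to_compressed_sparse_row(matrix):
--     # Two-pass CSR build: count nonzeros per row, build row_pointers as a
--     # prefix-sum table, preallocate the output arrays, then scatter each
--     # nonzero into place with a cursor array (a copy of row_pointers).
--     counts = [sum(1 for v in row if v != 0) for row in matrix]
--     row_pointers = [0]
--     for c in counts: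
--         row_pointers.append(row_pointers[-1] + c)
--     nnz = row_pointers[-1]
--     values = [0] * nnz
--     col_indices = [0] * nnz
--     cursor = row_pointers.copy()
--     for i, row in enumerate(matrix):
--         for j, val in enumerate(row):
--             if val != 0:
--                 k = cursor[i]
--                 values[k] = val
--                 col_indices[k] = j
--                 cursor[i] = k + 1
--     return values, col_indices, row_pointers
-- ===== Notes on version B (the rewrite author's own statement) =====
-- stated objective: alternative
-- what changed: B replaces A's single fused loop that appends to values/col_indices/row_pointers incrementally by a two-pass CSR build: a counting pass producing row_pointers as a prefix-sum table, then preallocated output arrays filled by scattering each nonzero through a cursor array copied from row_pointers.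
import Mathlib
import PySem

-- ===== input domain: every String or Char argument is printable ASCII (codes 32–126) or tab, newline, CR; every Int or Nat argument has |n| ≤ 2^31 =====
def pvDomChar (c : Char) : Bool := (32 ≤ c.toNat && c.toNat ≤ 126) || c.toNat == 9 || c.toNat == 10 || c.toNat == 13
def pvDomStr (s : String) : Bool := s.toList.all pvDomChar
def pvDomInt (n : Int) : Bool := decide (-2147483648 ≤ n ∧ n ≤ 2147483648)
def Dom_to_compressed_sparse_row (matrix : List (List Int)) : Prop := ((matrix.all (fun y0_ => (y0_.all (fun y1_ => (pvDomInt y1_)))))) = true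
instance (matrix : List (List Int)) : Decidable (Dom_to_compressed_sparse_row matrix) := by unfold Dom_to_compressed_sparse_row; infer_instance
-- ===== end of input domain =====

-- B replaces A's incremental triple-append loop by a two-pass build: per-row
-- nonzero counts give row_pointers as a prefix-sum table, the value/column
-- arrays are preallocated and filled by scattering through a cursor array
-- (objective: alternative decomposition, same O(V^2) cost).

-- ===== PORT A =====
def csrRowStepA (vc : List Int × List Int) (jv : Int × Int) : List Int × List Int :=
  if jv.2 ≠ 0 then (vc.1 ++ [jv.2], vc.2 ++ [jv.1]) else vc

def csrStepA (st : List Int × List Int × List Int) (row : List Int) :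
    List Int × List Int × List Int :=
  let vc := (PySem.List.enumerate row 0).foldl csrRowStepA (st.1, st.2.1)
  (vc.1, vc.2, st.2.2 ++ [(vc.1.length : Int)])

def to_compressed_sparse_row (matrix : List (List Int)) : List Int × List Int × List Int :=
  matrix.foldl csrStepA ([], [], [0])

-- ===== PORT B =====
def csrCount (row : List Int) : Int :=
  row.foldl (fun a v => if v ≠ 0 then a + 1 else a) 0

def csrRowPtrStep (rp : List Int) (c : Int) : List Int :=
  rp ++ [PySem.List.pyGetD rp (-1) 0 + c]

def csrScatterStep (i : Int) (st : List Int × List Int × List Int) (jv : Int × Int) :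
    List Int × List Int × List Int :=
  if jv.2 ≠ 0 then
    let k := PySem.List.pyGetD st.2.2 i 0
    (PySem.List.pySetD st.1 k jv.2, PySem.List.pySetD st.2.1 k jv.1,
     PySem.List.pySetD st.2.2 i (k + 1))
  else st

def csrScatterRow (st : List Int × List Int × List Int) (irow : Int × List Int) :
    List Int × List Int × List Int :=
  (PySem.List.enumerate irow.2 0).foldl (csrScatterStep irow.1) st

def to_compressed_sparse_row_alt (matrix : List (List Int)) : List Int × List Int × List Int :=
  let counts := matrix.map csrCount
  let row_pointers := counts.foldl csrRowPtrStep [0]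
  let nnz := PySem.List.pyGetD row_pointers (-1) 0
  -- cursor = row_pointers.copy(): Lean lists are persistent, so passing
  -- row_pointers itself as the initial cursor is the copy.
  let st := (PySem.List.enumerate matrix 0).foldl csrScatterRow
              (List.replicate nnz.toNat 0, List.replicate nnz.toNat 0, row_pointers)
  (st.1, st.2.1, row_pointers)

-- ===== PRECONDITION & SPEC =====
def Spec_to_compressed_sparse_row (matrix : List (List Int)) (out : List Int × List Int × List Int) : Prop := out = to_compressed_sparse_row_alt matrix
instance (matrix : List (List Int)) (out : List Int × List Int × List Int) : Decidable (Spec_to_compressed_sparse_row matrix out) := by unfold Spec_to_compressed_sparse_row; infer_instance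

-- ===== CLAIM (what is proved, stated in full; the proofs are below) =====
def Claim_equal_to_compressed_sparse_row : Prop := ∀ (matrix : List (List Int)), Dom_to_compressed_sparse_row matrix → Spec_to_compressed_sparse_row matrix (to_compressed_sparse_row matrix)

-- ===== LEMMAS AND PROOFS =====

/-- nonzero entries of an enumerated row -/
def csrNz (l : List (Int × Int)) : List (Int × Int) := l.filter (fun p => p.2 ≠ 0)

/-- number of nonzeros in a row -/
def cntN (row : List Int) : Nat := (csrNz (PySem.List.enumerate row 0)).length

/-- total nonzeros of a list of rows -/
def totalN (rows : List (List Int)) : Nat := (rows.map cntN).sum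

/-- flattened nonzero values -/
def Fv (rows : List (List Int)) : List Int :=
  rows.flatMap (fun row => (csrNz (PySem.List.enumerate row 0)).map (·.2))

/-- flattened column indices -/
def Fc (rows : List (List Int)) : List Int :=
  rows.flatMap (fun row => (csrNz (PySem.List.enumerate row 0)).map (·.1))

/-- row-pointer tail starting from offset n -/
def rpsFrom (n : Nat) : List (List Int) → List Int
  | [] => []
  | row :: t => ((n + cntN row : Nat) : Int) :: rpsFrom (n + cntN row) t

lemma A_inner (l : List (Int × Int)) : ∀ (vs cs : List Int),
    l.foldl csrRowStepA (vs, cs)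
      = (vs ++ (csrNz l).map (·.2), cs ++ (csrNz l).map (·.1)) := by
  induction l with
  | nil => intro vs cs; simp [csrNz]
  | cons p t ih =>
    intro vs cs
    by_cases h : p.2 = 0
    · simp [csrRowStepA, h, ih, csrNz]
    · simp [csrRowStepA, h, ih, csrNz]

lemma A_outer (rows : List (List Int)) : ∀ (vs cs rps : List Int),
    rows.foldl csrStepA (vs, cs, rps)
      = (vs ++ Fv rows, cs ++ Fc rows, rps ++ rpsFrom vs.length rows) := by
  induction rows with
  | nil => intro vs cs rps; simp [Fv, Fc, rpsFrom]
  | cons row t ih =>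
    intro vs cs rps
    simp only [List.foldl_cons, csrStepA, A_inner, ih]
    simp [Fv, Fc, rpsFrom, cntN, List.append_assoc]

lemma cnt_fold (row : List Int) : ∀ a : Int,
    row.foldl (fun a v => if v ≠ 0 then a + 1 else a) a
      = a + ((row.filter (fun v => v ≠ 0)).length : Int) := by
  induction row with
  | nil => intro a; simp
  | cons v t ih =>
    intro a
    by_cases h : v = 0
    · simp [h]
      simpa using ih a
    · simp [h]
      have := ih (a + 1)
      simp at this
      rw [this]
      ring

lemma cntN_enum (row : List Int) : ∀ s : Int,
    (csrNz (PySem.List.enumerate row s)).length = (row.filter (fun v => v ≠ 0)).length := by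
  induction row with
  | nil => intro s; simp [csrNz, PySem.List.enumerate_nil]
  | cons v t ih =>
    intro s
    by_cases h : v = 0
    · simp [csrNz, PySem.List.enumerate_cons, h]
      simpa [csrNz] using ih (s + 1)
    · simp [csrNz, PySem.List.enumerate_cons, h]
      simpa [csrNz] using ih (s + 1)

lemma cntN_filter (row : List Int) : cntN row = (row.filter (fun v => v ≠ 0)).length :=
  cntN_enum row 0

lemma csrCount_eq (row : List Int) : csrCount row = (cntN row : Int) := by
  rw [csrCount, cnt_fold, cntN_filter]; simp

def rpTail (x : Int) : List Int → List Int
  | [] => []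
  | c :: t => (x + c) :: rpTail (x + c) t

lemma rp_fold (counts : List Int) : ∀ (init : List Int) (x : Int),
    counts.foldl csrRowPtrStep (init ++ [x]) = init ++ [x] ++ rpTail x counts := by
  induction counts with
  | nil => intro init x; simp [rpTail]
  | cons c t ih =>
    intro init x
    have hs : csrRowPtrStep (init ++ [x]) c = (init ++ [x]) ++ [x + c] := by
      simp [csrRowPtrStep, PySem.List.pyGetD_neg_one_append_singleton]
    rw [List.foldl_cons, hs, ih (init ++ [x]) (x + c)]
    simp [rpTail, List.append_assoc]

lemma rpTail_map (rows : List (List Int)) : ∀ n : Nat,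
    rpTail (n : Int) (rows.map csrCount) = rpsFrom n rows := by
  induction rows with
  | nil => intro n; simp [rpTail, rpsFrom]
  | cons r t ih =>
    intro n
    simp only [List.map_cons, rpTail, csrCount_eq, rpsFrom]
    push_cast
    rw [← ih (n + cntN r)]
    push_cast
    rfl

lemma getLast_rps (rows : List (List Int)) : ∀ (n : Nat) h,
    (((n : Int) :: rpsFrom n rows).getLast h) = ((n + totalN rows : Nat) : Int) := by
  induction rows with
  | nil =>
    intro n h
    simp only [rpsFrom]
    simp [totalN]
  | cons r t ih =>
    intro n h
    simp only [rpsFrom]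
    rw [List.getLast_cons (by simp), ih (n + cntN r)]
    simp [totalN]
    omega

lemma rp_last (rows : List (List Int)) (n : Nat) :
    PySem.List.pyGetD ((n : Int) :: rpsFrom n rows) (-1) 0 = ((n + totalN rows : Nat) : Int) := by
  rw [PySem.List.pyGetD_neg_one _ _ (by simp), getLast_rps]

lemma set_append_len (pre : List Int) (v a : Int) (rest : List Int) :
    (pre ++ a :: rest).set pre.length v = pre ++ v :: rest := by
  rw [List.set_append]
  simp

lemma length_rpsFrom (rows : List (List Int)) : ∀ n, (rpsFrom n rows).length = rows.length := by
  induction rows with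
  | nil => intro n; simp [rpsFrom]
  | cons r t ih => intro n; simp [rpsFrom, ih]

lemma rp_get (rows : List (List Int)) : ∀ (k n : Nat), k ≤ rows.length →
    ((n : Int) :: rpsFrom n rows).getD k 0 = ((n + totalN (rows.take k) : Nat) : Int) := by
  induction rows with
  | nil =>
    intro k n hk
    have : k = 0 := by simpa using hk
    subst this
    simp [totalN]
  | cons r t ih =>
    intro k n hk
    cases k with
    | zero => simp [totalN]
    | succ k =>
      simp only [rpsFrom, List.getD_cons_succ]
      rw [ih k (n + cntN r) (by simpa using hk)]
      simp [totalN, List.take_succ_cons]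
      omega

lemma B_inner (l : List (Int × Int)) : ∀ (preV padV preC padC cursor : List Int) (i : Int),
    0 ≤ i → i.toNat < cursor.length →
    PySem.List.pyGetD cursor i 0 = (preV.length : Int) →
    preC.length = preV.length →
    (csrNz l).length ≤ padV.length →
    (csrNz l).length ≤ padC.length →
    l.foldl (csrScatterStep i) (preV ++ padV, preC ++ padC, cursor)
      = (preV ++ (csrNz l).map (·.2) ++ padV.drop (csrNz l).length,
         preC ++ (csrNz l).map (·.1) ++ padC.drop (csrNz l).length,
         cursor.set i.toNat ((preV.length : Int) + (csrNz l).length)) := by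
  induction l with
  | nil =>
    intro preV padV preC padC cursor i hi hil hcur hpc hV hC
    have hg : cursor[i.toNat] = (preV.length : Int) := by
      rw [← PySem.List.pyGetD_eq_getElem cursor 0 hi (by omega)]
      exact hcur
    simp [csrNz, ← hg, List.set_getElem_self hil]
  | cons p t ih =>
    intro preV padV preC padC cursor i hi hil hcur hpc hV hC
    by_cases h : p.2 = 0
    · rw [List.foldl_cons, csrScatterStep, if_neg (by simp [h])]
      rw [ih preV padV preC padC cursor i hi hil hcur hpc
        (by simpa [csrNz, List.filter_cons, h] using hV)
        (by simpa [csrNz, List.filter_cons, h] using hC)]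
      simp [csrNz, h]
    · have hnzlen : (csrNz (p :: t)).length = (csrNz t).length + 1 := by
        simp [csrNz, h]
      obtain ⟨v0, padV', rfl⟩ : ∃ v0 padV', padV = v0 :: padV' := by
        cases padV with
        | nil => exfalso; rw [hnzlen] at hV; simp at hV
        | cons a b => exact ⟨a, b, rfl⟩
      obtain ⟨c0, padC', rfl⟩ : ∃ c0 padC', padC = c0 :: padC' := by
        cases padC with
        | nil => exfalso; rw [hnzlen] at hC; simp at hC
        | cons a b => exact ⟨a, b, rfl⟩
      rw [List.foldl_cons, csrScatterStep, if_pos (by simpa using h)]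
      simp only [hcur]
      have e1 : PySem.List.pySetD (preV ++ v0 :: padV') ((preV.length : Nat) : Int) p.2
          = preV ++ p.2 :: padV' := by
        rw [PySem.List.pySetD_natCast, set_append_len]
      have e2 : PySem.List.pySetD (preC ++ c0 :: padC') ((preV.length : Nat) : Int) p.1
          = preC ++ p.1 :: padC' := by
        rw [← hpc, PySem.List.pySetD_natCast, set_append_len]
      have e3 : PySem.List.pySetD cursor i ((preV.length : Int) + 1)
          = cursor.set i.toNat ((preV.length : Int) + 1) := by
        rw [PySem.List.pySetD_of_nonneg _ _ hi]
      rw [e1, e2, e3]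
      have hpre : preV ++ p.2 :: padV' = (preV ++ [p.2]) ++ padV' := by simp
      have hprc : preC ++ p.1 :: padC' = (preC ++ [p.1]) ++ padC' := by simp
      rw [hpre, hprc]
      rw [ih (preV ++ [p.2]) padV' (preC ++ [p.1]) padC'
        (cursor.set i.toNat ((preV.length : Int) + 1)) i hi (by simpa using hil)
        (by
          rw [PySem.List.pyGetD_eq_getElem _ 0 hi (by simp only [List.length_set]; omega)]
          rw [List.getElem_set]
          simp)
        (by simp [hpc])
        (by rw [hnzlen] at hV; simpa using hV)
        (by rw [hnzlen] at hC; simpa using hC)]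
      rw [List.set_set]
      simp only [csrNz, List.filter_cons]
      rw [if_pos (by simpa using h)]
      simp [List.append_assoc]
      congr 1
      ring

lemma B_outer (rows : List (List Int)) : ∀ (s : Nat) (preV preC cursor : List Int),
    s + rows.length ≤ cursor.length →
    (∀ k : Nat, k < rows.length →
      PySem.List.pyGetD cursor ((s + k : Nat) : Int) 0
        = ((preV.length + totalN (rows.take k) : Nat) : Int)) →
    preC.length = preV.length →
    ((PySem.List.enumerate rows (s : Int)).foldl csrScatterRow
        (preV ++ List.replicate (totalN rows) 0, preC ++ List.replicate (totalN rows) 0, cursor)).1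
      = preV ++ Fv rows
    ∧ ((PySem.List.enumerate rows (s : Int)).foldl csrScatterRow
        (preV ++ List.replicate (totalN rows) 0, preC ++ List.replicate (totalN rows) 0, cursor)).2.1
      = preC ++ Fc rows := by
  induction rows with
  | nil =>
    intro s preV preC cursor hlen hcur hpc
    simp [PySem.List.enumerate_nil, Fv, Fc, totalN]
  | cons row t ih =>
    intro s preV preC cursor hlen hcur hpc
    rw [PySem.List.enumerate_cons, List.foldl_cons]
    have hcur0 : PySem.List.pyGetD cursor ((s : Nat) : Int) 0 = (preV.length : Int) := by
      have h0 := hcur 0 (by simp)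
      simpa [totalN] using h0
    have hfirst : csrScatterRow
        (preV ++ List.replicate (totalN (row :: t)) 0,
         preC ++ List.replicate (totalN (row :: t)) 0, cursor) ((s : Int), row)
        = (preV ++ (csrNz (PySem.List.enumerate row 0)).map (·.2) ++ List.replicate (totalN t) 0,
           preC ++ (csrNz (PySem.List.enumerate row 0)).map (·.1) ++ List.replicate (totalN t) 0,
           cursor.set s ((preV.length : Int) + (cntN row : Int))) := by
      rw [csrScatterRow]
      rw [B_inner (PySem.List.enumerate row 0) preV (List.replicate (totalN (row :: t)) 0)
        preC (List.replicate (totalN (row :: t)) 0) cursor ((s : Nat) : Int)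
        (by positivity)
        (by simp only [List.length_cons] at hlen; simp; omega) hcur0 hpc
        (by simp [totalN, cntN]) (by simp [totalN, cntN])]
      have hd : List.drop (csrNz (PySem.List.enumerate row 0)).length
          (List.replicate (totalN (row :: t)) (0 : Int)) = List.replicate (totalN t) 0 := by
        rw [List.drop_replicate]
        congr 1
        simp [totalN, cntN]
      rw [hd]
      simp [cntN]
    rw [hfirst]
    have hcast : ((s : Int) + 1) = ((s + 1 : Nat) : Int) := by push_cast; ring
    rw [hcast]
    have hres := ih (s + 1) (preV ++ (csrNz (PySem.List.enumerate row 0)).map (·.2))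
        (preC ++ (csrNz (PySem.List.enumerate row 0)).map (·.1))
        (cursor.set s ((preV.length : Int) + (cntN row : Int)))
        (by simp only [List.length_cons] at hlen; simp; omega)
        (by
          intro k hk
          have hidx : s + 1 + k = s + (k + 1) := by omega
          rw [hidx, PySem.List.pyGetD_natCast, List.getD_eq_getElem?_getD, List.getElem?_set,
              if_neg (by omega), ← List.getD_eq_getElem?_getD, ← PySem.List.pyGetD_natCast,
              hcur (k + 1) (by simpa using hk)]
          congr 1
          simp [totalN, cntN, List.take_succ_cons]
          omega)
        (by simp [hpc])
    refine ⟨?_, ?_⟩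
    · rw [hres.1]
      simp [Fv, List.append_assoc]
    · rw [hres.2]
      simp [Fc, List.append_assoc]

lemma rp_closed (matrix : List (List Int)) :
    ((matrix.map csrCount).foldl csrRowPtrStep [0]) = (0 : Int) :: rpsFrom 0 matrix := by
  have h1 := rp_fold (matrix.map csrCount) [] 0
  simp only [List.nil_append] at h1
  rw [h1]
  have h2 := rpTail_map matrix 0
  simp only [Nat.cast_zero] at h2
  rw [h2]
  simp

-- ===== VERDICT (by name: the statement is the Claim_ definition above) =====
theorem to_compressed_sparse_row_spec : Claim_equal_to_compressed_sparse_row := by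
  intro matrix _
  show to_compressed_sparse_row matrix = to_compressed_sparse_row_alt matrix
  have hA : to_compressed_sparse_row matrix
      = (Fv matrix, Fc matrix, (0 : Int) :: rpsFrom 0 matrix) := by
    rw [to_compressed_sparse_row, A_outer]
    simp
  have hnnz : PySem.List.pyGetD ((0 : Int) :: rpsFrom 0 matrix) (-1) 0
      = ((totalN matrix : Nat) : Int) := by
    have := rp_last matrix 0
    simpa using this
  have hsc := B_outer matrix 0 [] [] ((0 : Int) :: rpsFrom 0 matrix)
    (by simp [length_rpsFrom])
    (by
      intro k hk
      have := rp_get matrix k 0 (by omega)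
      rw [PySem.List.pyGetD_natCast]
      simpa using this)
    rfl
  simp only [Nat.cast_zero, List.nil_append] at hsc
  rw [hA, to_compressed_sparse_row_alt]
  simp only [rp_closed, hnnz, Int.toNat_natCast]
  exact Prod.ext (hsc.1.symm) (Prod.ext (hsc.2.symm) rfl)
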